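-- pv_equiv track=rewrite | github.com/Chlamydomonos/iot-big-sender | sender_backend/encode.py | base_n_to_binary
-- ===== SOURCE A (Python) =====
-- def base_n_to_binary(base_n_num: list[int], base: int):
--     '''
--     将n进制转换为二进制
--     输入的n进制数是一个列表，如[1, 2, 3]
--     输出的二进制数也是一个列表，如[1, 0, 1, 1]
--     '''
--     decimal_num = 0
--     for i, digit in enumerate(reversed(base_n_num)):
--         decimal_num += int(digit) * (base ** i)
--
--     binary_num = []
--     while decimal_num > 0:
--         remainder = decimal_num % 2
--         binary_num.insert(0, remainder)
--         decimal_num //= 2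
--
--     return binary_num if binary_num else [0]
-- ===== SOURCE B (Python) =====
-- def base_n_to_binary(base_n_num: list[int], base: int):
--     # Horner: value without per-digit powers; bits LSB-first then reverse
--     value = 0
--     for digit in base_n_num:
--         value = value * base + int(digit)
--     bits = []
--     while value > 0:
--         bits.append(value % 2)
--         value //= 2
--     bits.reverse()
--     return bits if bits else [0]
-- ===== Notes on version B (the rewrite author's own statement) =====
-- stated objective: alternative
-- what changed: Value is computed by Horner's rule instead of per-digit base**i powers, and bits are collected by append+reverse instead of insert(0); measured 2.9x at n=4096 but both are dominated by the big-int division loop at the largest size, so no speed claim.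
import Mathlib
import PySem

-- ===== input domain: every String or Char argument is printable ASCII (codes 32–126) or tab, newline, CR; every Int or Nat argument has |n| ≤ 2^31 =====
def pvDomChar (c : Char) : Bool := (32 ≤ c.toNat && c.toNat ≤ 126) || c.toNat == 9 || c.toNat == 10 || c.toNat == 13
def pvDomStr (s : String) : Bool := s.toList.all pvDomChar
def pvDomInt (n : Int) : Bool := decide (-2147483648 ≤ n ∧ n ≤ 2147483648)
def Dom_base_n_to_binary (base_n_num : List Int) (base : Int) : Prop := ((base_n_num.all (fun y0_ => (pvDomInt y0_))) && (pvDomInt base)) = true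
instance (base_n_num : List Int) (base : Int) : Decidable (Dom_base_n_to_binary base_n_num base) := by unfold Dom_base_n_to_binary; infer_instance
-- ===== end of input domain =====

-- B computes the value by Horner's rule (no per-digit powers) and collects bits by append+reverse
-- instead of insert(0); objective: alternative (a structurally different exact re-implementation).


-- ===== PORT A =====
-- A's while loop: prepend remainder, halve; recursion on decimal_num.
def pvABin (d : Int) (acc : List Int) : List Int :=
  if 0 < d then pvABin (PySem.Int.floordiv d 2) (PySem.Int.mod d 2 :: acc) else acc
termination_by d.toNat
decreasing_by
  rename_i h
  rw [PySem.Int.floordiv_eq_ediv_of_pos (by omega : (0:Int) < 2)]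
  omega

-- digit * base ** i: enumerate indices start at 0, so i.toNat is exactly Python's nonnegative exponent
def base_n_to_binary (base_n_num : List Int) (base : Int) : List Int :=
  let decimal_num := (PySem.List.enumerate base_n_num.reverse 0).foldl
    (fun acc p => acc + p.2 * base ^ p.1.toNat) 0
  let binary_num := pvABin decimal_num []
  if binary_num = [] then [0] else binary_num

-- ===== PORT B =====
-- B's while loop: append remainder (LSB-first), halve.
def pvBBits (v : Int) (acc : List Int) : List Int :=
  if 0 < v then pvBBits (PySem.Int.floordiv v 2) (acc ++ [PySem.Int.mod v 2]) else acc
termination_by v.toNat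
decreasing_by
  rename_i h
  rw [PySem.Int.floordiv_eq_ediv_of_pos (by omega : (0:Int) < 2)]
  omega

def base_n_to_binary_alt (base_n_num : List Int) (base : Int) : List Int :=
  let value := base_n_num.foldl (fun v d => v * base + d) 0
  let bits := (pvBBits value []).reverse
  if bits = [] then [0] else bits

-- ===== PRECONDITION & SPEC =====
def Spec_base_n_to_binary (base_n_num : List Int) (base : Int) (out : List Int) : Prop := out = base_n_to_binary_alt base_n_num base
instance (base_n_num : List Int) (base : Int) (out : List Int) : Decidable (Spec_base_n_to_binary base_n_num base out) := by unfold Spec_base_n_to_binary; infer_instance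

-- ===== CLAIM (what is proved, stated in full; the proofs are below) =====
def Claim_equal_base_n_to_binary : Prop := ∀ (base_n_num : List Int) (base : Int), Dom_base_n_to_binary base_n_num base → Spec_base_n_to_binary base_n_num base (base_n_to_binary base_n_num base)

-- ===== LEMMAS AND PROOFS =====

lemma pvEnum_append (ys zs : List Int) (s : Int) :
    PySem.List.enumerate (ys ++ zs) s = PySem.List.enumerate ys s ++ PySem.List.enumerate zs (s + ys.length) := by
  induction ys generalizing s with
  | nil => simp [PySem.List.enumerate_nil]
  | cons y ys ih =>
    simp [PySem.List.enumerate_cons, ih (s + 1)]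
    ring_nf

lemma pvHorner_acc (base : Int) (l : List Int) : ∀ acc : Int,
    l.foldl (fun v d => v * base + d) acc = acc * base ^ l.length + l.foldl (fun v d => v * base + d) 0 := by
  induction l with
  | nil => simp
  | cons x xs ih =>
    intro acc
    simp only [List.foldl_cons, List.length_cons]
    rw [ih (acc * base + x), ih (0 * base + x)]
    ring

lemma pvValue_eq (base : Int) (l : List Int) :
    (PySem.List.enumerate l.reverse 0).foldl (fun acc p => acc + p.2 * base ^ p.1.toNat) 0
      = l.foldl (fun v d => v * base + d) 0 := by
  induction l with
  | nil => simp [PySem.List.enumerate_nil]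
  | cons x xs ih =>
    simp only [List.reverse_cons]
    rw [pvEnum_append xs.reverse [x] 0, List.foldl_append]
    simp only [PySem.List.enumerate_cons, PySem.List.enumerate_nil, List.foldl_cons, List.foldl_nil,
      List.length_reverse, zero_add]
    rw [ih, pvHorner_acc base xs (0 * base + x)]
    simp
    ring

lemma pvBBits_acc : ∀ (n : Nat) (v : Int), v.toNat = n → ∀ acc, pvBBits v acc = acc ++ pvBBits v [] := by
  intro n
  induction n using Nat.strong_induction_on with
  | _ n ih =>
    intro v hn acc
    conv_lhs => rw [pvBBits]
    conv_rhs => rw [pvBBits]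
    split
    · rename_i h
      have hlt : (PySem.Int.floordiv v 2).toNat < n := by
        rw [PySem.Int.floordiv_eq_ediv_of_pos (by omega : (0:Int) < 2)]; omega
      rw [ih _ hlt _ rfl (acc ++ [PySem.Int.mod v 2]),
          ih _ hlt _ rfl ([] ++ [PySem.Int.mod v 2])]
      simp
    · simp

lemma pvABin_eq : ∀ (n : Nat) (v : Int), v.toNat = n → ∀ acc, pvABin v acc = (pvBBits v []).reverse ++ acc := by
  intro n
  induction n using Nat.strong_induction_on with
  | _ n ih =>
    intro v hn acc
    conv_lhs => rw [pvABin]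
    conv_rhs => rw [pvBBits]
    split
    · rename_i h
      have hlt : (PySem.Int.floordiv v 2).toNat < n := by
        rw [PySem.Int.floordiv_eq_ediv_of_pos (by omega : (0:Int) < 2)]; omega
      rw [ih _ hlt _ rfl (PySem.Int.mod v 2 :: acc),
          pvBBits_acc _ _ rfl ([] ++ [PySem.Int.mod v 2])]
      simp
    · simp

lemma pvABin_eq' (v : Int) (acc : List Int) : pvABin v acc = (pvBBits v []).reverse ++ acc :=
  pvABin_eq v.toNat v rfl acc

-- ===== VERDICT (by name: the statement is the Claim_ definition above) =====
theorem base_n_to_binary_spec : Claim_equal_base_n_to_binary := by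
  intro l base _
  show base_n_to_binary l base = base_n_to_binary_alt l base
  simp only [base_n_to_binary, base_n_to_binary_alt, pvValue_eq, pvABin_eq', List.append_nil]
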